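-- pv_equiv track=rewrite | github.com/KatsuyaKai/programming-project | prosite.py | PatternTranslation
-- ===== SOURCE A (Python) =====
-- def PatternTranslation(pattern):
--
-- 	Prosite_Expressions = ['.','x','-','{','}','(',')','<','>','>]']
-- 	RE_Expressions = ['','.','','[^',']','{','}','^','$',']?$']
-- 	for cambio in range(len(RE_Expressions)):
-- 		pattern = pattern.replace(Prosite_Expressions[cambio],RE_Expressions[cambio])
-- 	'''patron = pattern.replace('.','')
-- 	patron1 = patron.replace('x','.')
-- 	patron2 = patron1.replace('-','')
-- 	patron3 = patron2.replace('{','[^')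
-- 	patron4 = patron3.replace('}',']')
-- 	patron5 = patron4.replace('(','{')
-- 	patron6 = patron5.replace(')','}')'''
-- 	return pattern
-- ===== SOURCE B (Python) =====
-- def PatternTranslation(pattern):
-- 	mapping = {'.': '', 'x': '.', '-': '', '{': '[^',
-- 	           '}': ']', '(': '{', ')': '}', '<': '^', '>': '$'}
-- 	return ''.join(mapping.get(c, c) for c in pattern)
-- ===== Notes on version B (the rewrite author's own statement) =====
-- stated objective: idiomatic
-- what changed: Replaces ten sequential full-string str.replace passes (paired source/target lists, the last '>]' rule being unreachable) by a single pass over the characters with a translation dict, joining the mapped pieces.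
import Mathlib
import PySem

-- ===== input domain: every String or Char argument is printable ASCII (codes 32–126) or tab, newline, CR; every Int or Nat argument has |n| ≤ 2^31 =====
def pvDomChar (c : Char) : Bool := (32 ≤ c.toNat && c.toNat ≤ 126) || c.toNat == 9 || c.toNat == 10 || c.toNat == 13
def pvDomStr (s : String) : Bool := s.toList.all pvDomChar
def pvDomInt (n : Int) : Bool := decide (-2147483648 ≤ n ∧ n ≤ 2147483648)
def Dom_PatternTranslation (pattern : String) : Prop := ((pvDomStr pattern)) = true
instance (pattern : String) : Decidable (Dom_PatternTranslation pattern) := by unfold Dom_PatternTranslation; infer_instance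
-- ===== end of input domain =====

-- B replaces A's ten sequential full-string .replace passes by one pass over the
-- characters with a lookup table (idiomatic single-pass translation; same output).

-- ===== PORT A =====
def prositeExpressions : List String := [".", "x", "-", "{", "}", "(", ")", "<", ">", ">]"]
def reExpressions : List String := ["", ".", "", "[^", "]", "{", "}", "^", "$", "]?$"]

def PatternTranslation (pattern : String) : String :=
  (PySem.List.pyRange 0 (PySem.List.len reExpressions) 1).foldl
    (fun pat cambio =>
      PySem.Str.replace pat (PySem.List.pyGetD prositeExpressions cambio "")
        (PySem.List.pyGetD reExpressions cambio ""))
    pattern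

-- ===== PORT B =====
def pvMapping : PySem.Dict Char String :=
  PySem.Dict.ofList
    [('.', ""), ('x', "."), ('-', ""), ('{', "[^"),
     ('}', "]"), ('(', "{"), (')', "}"), ('<', "^"), ('>', "$")]

def PatternTranslation_alt (pattern : String) : String :=
  PySem.Str.join "" (pattern.toList.map (fun c => pvMapping.getD c (String.ofList [c])))

-- ===== PRECONDITION & SPEC =====
def Spec_PatternTranslation (pattern : String) (out : String) : Prop := out = PatternTranslation_alt pattern
instance (pattern : String) (out : String) : Decidable (Spec_PatternTranslation pattern out) := by unfold Spec_PatternTranslation; infer_instance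

-- ===== CLAIM (what is proved, stated in full; the proofs are below) =====
def Claim_equal_PatternTranslation : Prop := ∀ (pattern : String), Dom_PatternTranslation pattern → Spec_PatternTranslation pattern (PatternTranslation pattern)

-- ===== LEMMAS AND PROOFS =====

-- the per-character translation B performs, on the char-list side
def bmap (c : Char) : List Char :=
  if c = '.' then [] else if c = 'x' then ['.'] else if c = '-' then []
  else if c = '{' then ['[', '^'] else if c = '}' then [']']
  else if c = '(' then ['{'] else if c = ')' then ['}']
  else if c = '<' then ['^'] else if c = '>' then ['$'] else [c]

-- a single-character .replace is a per-character flatMap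
theorem replace_go_single (c : Char) (ns : List Char) :
    ∀ (l acc : List Char) (fuel : Nat), l.length ≤ fuel →
      PySem.Chars.replace.go [c] ns fuel l acc
        = acc.reverse ++ l.flatMap (fun d => if d = c then ns else [d]) := by
  intro l
  induction l with
  | nil => intro acc fuel _; cases fuel <;> simp [PySem.Chars.replace.go]
  | cons d t ih =>
    intro acc fuel hf
    cases fuel with
    | zero => simp at hf
    | succ fuel =>
      simp only [List.length_cons, Nat.succ_le_succ_iff] at hf
      by_cases h : d = c
      · subst h
        simp [PySem.Chars.replace.go, List.isPrefixOf, ih _ fuel hf]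
      · have hpre : List.isPrefixOf [c] (d :: t) = false := by
          simp [List.isPrefixOf]; intro h'; exact absurd h'.symm h
        simp [PySem.Chars.replace.go, hpre, ih _ fuel hf, h]

theorem replace_single (s : List Char) (c : Char) (ns : List Char) :
    PySem.Chars.replace s [c] ns = s.flatMap (fun d => if d = c then ns else [d]) := by
  simpa using replace_go_single c ns s [] s.length le_rfl

-- the final '>]' pass never fires once every '>' has been replaced
theorem replace_go_gtbr (ns : List Char) :
    ∀ (l acc : List Char) (fuel : Nat), l.length ≤ fuel → '>' ∉ l →
      PySem.Chars.replace.go ['>', ']'] ns fuel l acc = acc.reverse ++ l := by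
  intro l
  induction l with
  | nil => intro acc fuel _ _; cases fuel <;> simp [PySem.Chars.replace.go]
  | cons d t ih =>
    intro acc fuel hf hm
    cases fuel with
    | zero => simp at hf
    | succ fuel =>
      simp only [List.length_cons, Nat.succ_le_succ_iff] at hf
      simp only [List.mem_cons, not_or] at hm
      have hpre : List.isPrefixOf ['>', ']'] (d :: t) = false := by
        simp [List.isPrefixOf]; intro h'; exact (hm.1 h').elim
      simp [PySem.Chars.replace.go, hpre, ih _ fuel hf hm.2]

theorem replace_gtbr (s : List Char) (ns : List Char) (h : '>' ∉ s) :
    PySem.Chars.replace s ['>', ']'] ns = s := by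
  simpa using replace_go_gtbr ns s [] s.length le_rfl h

-- bmap never produces '>'
theorem gt_not_mem_bmap (c : Char) : '>' ∉ bmap c := by
  unfold bmap
  split_ifs with h1 h2 h3 h4 h5 h6 h7 h8 h9 <;> simp_all
  exact fun h => h9 h.symm

-- the dict lookup of B computes bmap
theorem mapping_getD (c : Char) :
    (pvMapping.getD c (String.ofList [c])).toList = bmap c := by
  unfold bmap
  split_ifs with h1 h2 h3 h4 h5 h6 h7 h8 h9
  · subst h1; decide
  · subst h2; decide
  · subst h3; decide
  · subst h4; decide
  · subst h5; decide
  · subst h6; decide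
  · subst h7; decide
  · subst h8; decide
  · subst h9; decide
  · simp [pvMapping, PySem.Dict.ofList, PySem.Dict.getD,
      PySem.Dict.empty, PySem.Dict.update, PySem.Dict.insert, PySem.Dict.get?,
      Ne.symm h1, Ne.symm h2, Ne.symm h3, Ne.symm h4, Ne.symm h5,
      Ne.symm h6, Ne.symm h7, Ne.symm h8, Ne.symm h9]

-- A, read on the char-list side, is one flatMap of bmap
theorem A_toList (pattern : String) :
    (PatternTranslation pattern).toList = pattern.toList.flatMap bmap := by
  have hA : PatternTranslation pattern =
      PySem.Str.replace (PySem.Str.replace (PySem.Str.replace (PySem.Str.replace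
        (PySem.Str.replace (PySem.Str.replace (PySem.Str.replace (PySem.Str.replace
          (PySem.Str.replace (PySem.Str.replace pattern "." "") "x" ".") "-" "")
            "{" "[^") "}" "]") "(" "{") ")" "}") "<" "^") ">" "$") ">]" "]?$" := rfl
  rw [hA]
  simp only [PySem.Str.toList_replace]
  simp only [show ".".toList = ['.'] from rfl, show "x".toList = ['x'] from rfl,
    show "".toList = ([] : List Char) from rfl, show "[^".toList = ['[', '^'] from rfl,
    show "]".toList = [']'] from rfl, show "-".toList = ['-'] from rfl, show "{".toList = ['{'] from rfl,
    show "}".toList = ['}'] from rfl, show "(".toList = ['('] from rfl,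
    show ")".toList = [')'] from rfl, show "<".toList = ['<'] from rfl,
    show "^".toList = ['^'] from rfl, show ">".toList = ['>'] from rfl,
    show "$".toList = ['$'] from rfl, show ">]".toList = ['>', ']'] from rfl,
    show "]?$".toList = [']', '?', '$'] from rfl]
  rw [replace_single, replace_single, replace_single, replace_single, replace_single,
    replace_single, replace_single, replace_single, replace_single]
  simp only [List.flatMap_assoc]
  have hchain : ∀ d : Char,
      List.flatMap (fun x => List.flatMap (fun x => List.flatMap (fun x =>
        List.flatMap (fun x => List.flatMap (fun x => List.flatMap (fun x =>
          List.flatMap (fun x => List.flatMap (fun d => if d = '>' then ['$'] else [d])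
            (if x = '<' then ['^'] else [x]))
          (if x = ')' then ['}'] else [x]))
          (if x = '(' then ['{'] else [x]))
          (if x = '}' then [']'] else [x]))
          (if x = '{' then ['[', '^'] else [x]))
          (if x = '-' then [] else [x]))
          (if x = 'x' then ['.'] else [x]))
        (if d = '.' then ([] : List Char) else [d]) = bmap d := by
    intro d
    unfold bmap
    split_ifs with h1 h2 h3 h4 h5 h6 h7 h8 h9 <;> subst_vars <;> simp_all
  simp only [hchain]
  apply replace_gtbr
  simp only [List.mem_flatMap, not_exists, not_and]
  intro d _
  exact gt_not_mem_bmap d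

theorem flatten_intersperse_nil {α : Type} : ∀ (l : List (List α)),
    (List.intersperse [] l).flatten = l.flatten
  | [] => rfl
  | [a] => rfl
  | a :: b :: t => by
    simp only [List.intersperse, List.flatten_cons, List.nil_append]
    rw [show (List.intersperse [] (b :: t)).flatten = (b :: t).flatten from
      flatten_intersperse_nil (b :: t)]
    simp

theorem B_toList (pattern : String) :
    (PatternTranslation_alt pattern).toList = pattern.toList.flatMap bmap := by
  unfold PatternTranslation_alt
  rw [PySem.Str.toList_join]
  simp only [List.map_map]
  have : (String.toList ∘ fun c => pvMapping.getD c (String.ofList [c])) = bmap := by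
    funext c; exact mapping_getD c
  rw [this]
  simp only [PySem.Chars.join, List.intercalate, List.flatMap,
    show "".toList = ([] : List Char) from rfl]
  exact flatten_intersperse_nil _

-- ===== VERDICT (by name: the statement is the Claim_ definition above) =====
theorem PatternTranslation_spec : Claim_equal_PatternTranslation := by
  intro pattern _
  unfold Spec_PatternTranslation
  have h := (A_toList pattern).trans (B_toList pattern).symm
  have := congrArg String.ofList h
  simpa using this
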